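-- pv_equiv track=rewrite | github.com/hiwei93/python-dsa | 08_binary_search/bsearch_variants.py | bsearch_first_match_v1
-- ===== SOURCE A (Python) =====
-- def bsearch_first_match_v1(nums: list, v: int) -> int:
--     """
--     查找第一个值等于给定值的元素
--     """
--     n = len(nums)
--     low, high = 0, n - 1
--     while low <= high:
--         mid = low + ((high - low) >> 1)
--         if nums[mid] >= v:  # 目的：形成 low < v <= high, low + 1 = high; 这样保证找到的是第一个满足条件的值
--             high = mid - 1
--         else:
--             low = mid + 1
--
--     if low < n and nums[low] == v:  # 处理边界条件
--         return low
--     return -1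
-- ===== SOURCE B (Python) =====
-- def bsearch_first_match_v1(nums: list, v: int) -> int:
--     """Divide-and-conquer on slices: boundary(seg) returns the index (within seg)
--     of the first-match boundary; offsets are added back up the recursion."""
--     def boundary(seg):
--         if not seg:
--             return 0
--         m = (len(seg) - 1) >> 1
--         if seg[m] >= v:
--             return boundary(seg[:m])
--         return m + 1 + boundary(seg[m + 1:])
--
--     idx = boundary(nums)
--     if idx < len(nums) and nums[idx] == v:
--         return idx
--     return -1
-- ===== Notes on version B (the rewrite author's own statement) =====
-- stated objective: alternative
-- what changed: Replaced the imperative low/high while-loop with a divide-and-conquer recursion on list slices that returns the boundary index within each slice and adds offsets back up; the same >=-comparison tree is taken, so results match even on unsorted input.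
import Mathlib
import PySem

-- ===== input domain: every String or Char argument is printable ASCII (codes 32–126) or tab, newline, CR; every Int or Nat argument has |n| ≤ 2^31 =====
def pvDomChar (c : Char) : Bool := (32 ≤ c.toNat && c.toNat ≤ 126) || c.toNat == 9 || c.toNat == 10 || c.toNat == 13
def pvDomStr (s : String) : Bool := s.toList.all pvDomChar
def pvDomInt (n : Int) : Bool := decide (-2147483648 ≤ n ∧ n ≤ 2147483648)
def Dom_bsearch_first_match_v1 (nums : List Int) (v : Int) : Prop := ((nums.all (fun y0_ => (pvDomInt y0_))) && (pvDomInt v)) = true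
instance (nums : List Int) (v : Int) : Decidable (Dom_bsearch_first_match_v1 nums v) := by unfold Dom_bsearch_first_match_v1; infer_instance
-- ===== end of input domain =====

-- B re-implements A's while-loop binary search as a divide-and-conquer recursion on
-- list slices (same comparison tree, so equal on any input, sorted or not); objective: alternative.

-- ===== PORT A =====
-- midpoint bounds used by the loop's termination argument
theorem pvMidBounds (low high : Int) (h : low ≤ high) :
    low ≤ low + PySem.Int.floordiv (high - low) 2 ∧
    low + PySem.Int.floordiv (high - low) 2 ≤ high := by
  rw [PySem.Int.floordiv_eq_ediv_of_pos (by omega)]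
  omega

-- the while-loop of A on state (low, high); '(high - low) >> 1' is floor division by 2
-- (exact); nums[mid] is ported with pyGetD whose default 0 is never used: inside the loop
-- 0 ≤ low ≤ mid ≤ high < len nums at every access.
def pvLoopA (nums : List Int) (v : Int) (low high : Int) : Int :=
  if h : low ≤ high then
    let mid := low + PySem.Int.floordiv (high - low) 2
    if PySem.List.pyGetD nums mid 0 ≥ v then pvLoopA nums v low (mid - 1)
    else pvLoopA nums v (mid + 1) high
  else low
termination_by (high + 1 - low).toNat
decreasing_by
  · have := pvMidBounds low high h; omega
  · have := pvMidBounds low high h; omega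

def bsearch_first_match_v1 (nums : List Int) (v : Int) : Int :=
  let n : Int := nums.length
  let low := pvLoopA nums v 0 (n - 1)
  if low < n ∧ PySem.List.pyGetD nums low 0 = v then low else -1

-- ===== PORT B =====
-- boundary(seg): recursion on slices; seg[m] is in range (0 ≤ m < len seg when seg ≠ []).
def pvBoundary (v : Int) (seg : List Int) : Int :=
  if h : seg.isEmpty then 0
  else
    let m := (seg.length - 1) / 2
    if PySem.List.pyGetD seg (m : Int) 0 ≥ v then pvBoundary v (seg.take m)
    else (m : Int) + 1 + pvBoundary v (seg.drop (m + 1))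
termination_by seg.length
decreasing_by
  · have : seg.length ≠ 0 := by simpa [List.isEmpty_iff_length_eq_zero] using h
    simp [List.length_take]; omega
  · have : seg.length ≠ 0 := by simpa [List.isEmpty_iff_length_eq_zero] using h
    simp [List.length_drop]; omega

def bsearch_first_match_v1_alt (nums : List Int) (v : Int) : Int :=
  let idx := pvBoundary v nums
  if idx < (nums.length : Int) ∧ PySem.List.pyGetD nums idx 0 = v then idx else -1

-- ===== PRECONDITION & SPEC =====
def Spec_bsearch_first_match_v1 (nums : List Int) (v : Int) (out : Int) : Prop := out = bsearch_first_match_v1_alt nums v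
instance (nums : List Int) (v : Int) (out : Int) : Decidable (Spec_bsearch_first_match_v1 nums v out) := by unfold Spec_bsearch_first_match_v1; infer_instance

-- ===== CLAIM (what is proved, stated in full; the proofs are below) =====
def Claim_equal_bsearch_first_match_v1 : Prop := ∀ (nums : List Int) (v : Int), Dom_bsearch_first_match_v1 nums v → Spec_bsearch_first_match_v1 nums v (bsearch_first_match_v1 nums v)

-- ===== LEMMAS AND PROOFS =====

-- unfolding pvBoundary on a nonempty slice
theorem pvBoundary_ne (v : Int) (seg : List Int) (h : seg.isEmpty = false) :
    pvBoundary v seg =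
      if PySem.List.pyGetD seg (((seg.length - 1) / 2 : Nat) : Int) 0 ≥ v then
        pvBoundary v (seg.take ((seg.length - 1) / 2))
      else (((seg.length - 1) / 2 : Nat) : Int) + 1 + pvBoundary v (seg.drop ((seg.length - 1) / 2 + 1)) := by
  rw [pvBoundary]
  simp [h]

-- A's loop on window [low, high] equals low plus B's boundary on the slice nums[low : high+1].
theorem pvLoop_eq_boundary (v : Int) :
    ∀ (L : Nat) (nums : List Int) (low high : Int),
      (high + 1 - low).toNat = L → 0 ≤ low → high < nums.length →
      pvLoopA nums v low high = low + pvBoundary v ((nums.drop low.toNat).take L) := by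
  intro L
  induction L using Nat.strong_induction_on with
  | _ L IH =>
    intro nums low high hL hlo hhi
    rw [pvLoopA]
    by_cases h : low ≤ high
    · simp only [h, dif_pos]
      set seg := (nums.drop low.toNat).take L with hseg
      have hlen : seg.length = L := by
        simp [hseg, List.length_take, List.length_drop]; omega
      have hLpos : 1 ≤ L := by omega
      have hne : seg.isEmpty = false := by
        cases hs : seg with
        | nil => rw [hs] at hlen; simp at hlen; omega
        | cons a t => simp
      set M : Nat := (seg.length - 1) / 2 with hM
      have hmL : M < L := by omega
      clear_value seg M
      have hmid : low + PySem.Int.floordiv (high - low) 2 = low + (M : Int) := by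
        rw [PySem.Int.floordiv_eq_ediv_of_pos (by omega)]
        simp only [hM, hlen]
        omega
      have hget : PySem.List.pyGetD nums (low + (M : Int)) 0 = PySem.List.pyGetD seg ((M : Nat) : Int) 0 := by
        rw [PySem.List.pyGetD_eq_getElem nums 0 (by omega) (by omega),
            PySem.List.pyGetD_eq_getElem seg 0 (by omega) (by rw [hlen]; exact_mod_cast hmL)]
        have h1 : (low + (M : Int)).toNat = low.toNat + M := by omega
        have h2 : ((M : Int)).toNat = M := by omega
        simp only [h1, h2, hseg]
        rw [List.getElem_take, List.getElem_drop]
      rw [hmid, hget, pvBoundary_ne v seg hne, ← hM]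
      by_cases hc : PySem.List.pyGetD seg ((M : Nat) : Int) 0 ≥ v
      · rw [if_pos hc, if_pos hc]
        have hL' : (low + (M : Int) - 1 + 1 - low).toNat = M := by omega
        rw [IH M (by omega) nums low (low + (M : Int) - 1) hL' hlo (by omega)]
        have htake : seg.take M = (nums.drop low.toNat).take M := by
          rw [hseg, List.take_take]
          congr 1
          omega
        rw [htake]
      · rw [if_neg hc, if_neg hc]
        have hL' : (high + 1 - (low + (M : Int) + 1)).toNat = L - (M + 1) := by omega
        rw [IH (L - (M + 1)) (by omega) nums (low + (M : Int) + 1) high hL' (by omega) hhi]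
        have hdrop : seg.drop (M + 1)
            = (nums.drop (low + (M : Int) + 1).toNat).take (L - (M + 1)) := by
          rw [hseg, List.drop_take, List.drop_drop]
          have hx : low.toNat + (M + 1) = (low + (M : Int) + 1).toNat := by omega
          rw [hx]
        rw [hdrop]
        ring
    · simp only [h, dif_neg, not_false_iff]
      have : L = 0 := by omega
      subst this
      rw [pvBoundary]
      simp

-- ===== VERDICT (by name: the statement is the Claim_ definition above) =====
theorem bsearch_first_match_v1_spec : Claim_equal_bsearch_first_match_v1 := by
  intro nums v _
  unfold Spec_bsearch_first_match_v1 bsearch_first_match_v1 bsearch_first_match_v1_alt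
  have h := pvLoop_eq_boundary v nums.length nums 0 ((nums.length : Int) - 1)
    (by omega) le_rfl (by omega)
  simp at h
  simp [h]
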